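-- pv_equiv track=rewrite | github.com/moti9/iCode | cp/D_2_Magic_Powder_2.py | can_bake_cookies
-- ===== SOURCE A (Python) =====
-- def can_bake_cookies(cur, ingredients, available, k):
--     for i in range(len(ingredients)):
--         needed = (ingredients[i] * cur) - available[i]
--         if needed > 0:
--             k -= needed
--         if k < 0:
--             return False
--     return k >= 0
-- ===== SOURCE B (Python) =====
-- def can_bake_cookies(cur, ingredients, available, k):
--     # Total demand vs usable supply: stock beyond an ingredient's own demand is
--     # useless, so cap each stock at need*cur; feasible iff demand <= supply + k.
--     demand = cur * sum(ingredients)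
--     usable = sum(min(have, need * cur) for need, have in zip(ingredients, available))
--     return demand <= usable + k
-- ===== Notes on version B (the rewrite author's own statement) =====
-- stated objective: alternative
-- what changed: B never forms a per-item deficit or threads a running k: it compares total demand cur*sum(ingredients) against the usable supply (each stock capped at its own demand via min) plus k, in two staged aggregations, instead of A's index loop that subtracts positive deficits from k with a per-iteration early exit.
-- outside the precondition, e.g. on can_bake_cookies(2, [1, 2], [1], 0): A returns False, B returns False; on can_bake_cookies(1, [1, 5], [2], 0): A raises IndexError, B returns False; on can_bake_cookies(2, [1255, 5, 3, 2, -6639], [5, 1, 86, 10], 4): A returns False, B returns True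
import Mathlib
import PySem

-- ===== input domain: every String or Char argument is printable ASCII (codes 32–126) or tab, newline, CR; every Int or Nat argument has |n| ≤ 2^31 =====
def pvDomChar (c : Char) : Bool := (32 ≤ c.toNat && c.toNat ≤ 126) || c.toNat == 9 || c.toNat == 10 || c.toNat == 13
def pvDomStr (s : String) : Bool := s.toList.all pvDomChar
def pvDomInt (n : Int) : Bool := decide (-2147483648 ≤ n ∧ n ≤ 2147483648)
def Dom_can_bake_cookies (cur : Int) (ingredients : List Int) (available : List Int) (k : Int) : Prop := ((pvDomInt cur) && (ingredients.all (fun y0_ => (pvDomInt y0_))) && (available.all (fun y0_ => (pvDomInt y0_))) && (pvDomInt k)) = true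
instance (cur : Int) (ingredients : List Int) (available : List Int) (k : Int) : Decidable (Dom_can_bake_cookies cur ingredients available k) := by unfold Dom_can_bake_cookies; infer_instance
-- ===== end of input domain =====

-- B replaces A's deficit-subtracting loop with a total-demand vs capped-supply comparison (alternative formulation; return value only).

-- ===== PORT A =====
-- the for-loop over range(len(ingredients)) with running state k and the early 'return False'
def can_bake_cookies_loop (cur : Int) (ingredients : List Int) (available : List Int) :
    List Int → Int → Bool
  | [], k => decide (k ≥ 0)
  | i :: rest, k =>
      let needed := (PySem.List.pyGetD ingredients i 0) * cur - (PySem.List.pyGetD available i 0)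
      let k' := if needed > 0 then k - needed else k
      if k' < 0 then false
      else can_bake_cookies_loop cur ingredients available rest k'

def can_bake_cookies (cur : Int) (ingredients : List Int) (available : List Int) (k : Int) : Bool :=
  can_bake_cookies_loop cur ingredients available
    (PySem.List.pyRange 0 (ingredients.length : Int) 1) k

-- ===== PORT B =====
def can_bake_cookies_alt (cur : Int) (ingredients : List Int) (available : List Int) (k : Int) : Bool :=
  let demand := cur * ingredients.sum
  let usable := ((ingredients.zip available).map (fun p => min p.2 (p.1 * cur))).sum
  decide (demand ≤ usable + k)

-- ===== PRECONDITION & SPEC =====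
-- Pre_ excludes inputs where available is shorter than ingredients: there A raises IndexError at the missing index unless its early exit fires first (in which case it happens to return False).
def Pre_can_bake_cookies (cur : Int) (ingredients : List Int) (available : List Int) (k : Int) : Prop :=
  ingredients.length ≤ available.length
instance (cur : Int) (ingredients : List Int) (available : List Int) (k : Int) : Decidable (Pre_can_bake_cookies cur ingredients available k) := by unfold Pre_can_bake_cookies; infer_instance

def pvWitness_can_bake_cookies : Int × List Int × List Int × Int := (2, [3, 1], [5, 4], 2)

def Spec_can_bake_cookies (cur : Int) (ingredients : List Int) (available : List Int) (k : Int) (out : Bool) : Prop := out = can_bake_cookies_alt cur ingredients available k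
instance (cur : Int) (ingredients : List Int) (available : List Int) (k : Int) (out : Bool) : Decidable (Spec_can_bake_cookies cur ingredients available k out) := by unfold Spec_can_bake_cookies; infer_instance

-- ===== CLAIM (what is proved, stated in full; the proofs are below) =====
def Claim_equal_can_bake_cookies : Prop := ∀ (cur : Int) (ingredients : List Int) (available : List Int) (k : Int), Dom_can_bake_cookies cur ingredients available k → Pre_can_bake_cookies cur ingredients available k → Spec_can_bake_cookies cur ingredients available k (can_bake_cookies cur ingredients available k)

-- ===== LEMMAS AND PROOFS =====

-- Each per-index deficit is clamped at 0, so the partial sums are monotone; hence the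
-- early-exit loop answers exactly 'total deficit over the remaining indices ≤ k'.
theorem loop_eq_sum (cur : Int) (ing av : List Int) (idxs : List Int) (k : Int) :
    can_bake_cookies_loop cur ing av idxs k =
      decide ((idxs.map (fun i => max 0 ((PySem.List.pyGetD ing i 0) * cur - (PySem.List.pyGetD av i 0)))).sum ≤ k) := by
  induction idxs generalizing k with
  | nil =>
    simp only [can_bake_cookies_loop, List.map_nil, List.sum_nil, ge_iff_le]
    rfl
  | cons i rest ih =>
    have hnn : 0 ≤ (rest.map (fun i => max 0 ((PySem.List.pyGetD ing i 0) * cur - (PySem.List.pyGetD av i 0)))).sum := by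
      apply List.sum_nonneg; intro x hx
      simp only [List.mem_map] at hx
      obtain ⟨j, _, rfl⟩ := hx
      exact le_max_left _ _
    simp only [can_bake_cookies_loop, List.map_cons, List.sum_cons]
    split_ifs with h1 h2 h3 <;>
      first
        | (symm; simp only [decide_eq_false_iff_not]; omega)
        | (rw [ih]; simp only [decide_eq_decide]; omega)

-- Indexed deficits over range(len(ingredients)) are the zip-based deficits, when available is long enough.
theorem range_sum_eq_zip_sum (cur : Int) (ing av : List Int) (h : ing.length ≤ av.length) :
    ((PySem.List.pyRange 0 (ing.length : Int) 1).map
        (fun i => max 0 ((PySem.List.pyGetD ing i 0) * cur - (PySem.List.pyGetD av i 0)))) =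
      (ing.zip av).map (fun p => max 0 (p.1 * cur - p.2)) := by
  rw [PySem.List.pyRange_one]
  simp only [sub_zero, Int.toNat_natCast, zero_add]
  induction ing generalizing av with
  | nil => simp
  | cons x xs ih =>
    cases av with
    | nil => simp at h
    | cons a as =>
      simp only [List.length_cons, List.range_succ_eq_map, List.map_cons, List.map_map]
      simp only [List.zip_cons_cons, List.map_cons]
      congr 1
      · simp [PySem.List.pyGetD_zero_cons]
      · have := ih as (by simpa using h)
        rw [← this, List.map_map]
        apply List.map_congr_left
        intro n hn
        have hc : ((n : Int) + 1) = ((n + 1 : Nat) : Int) := by push_cast; ring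
        have e1 : PySem.List.pyGetD (x :: xs) ((n : Int) + 1) 0 = xs.getD n 0 := by
          rw [hc, PySem.List.pyGetD_natCast]; simp
        have e2 : PySem.List.pyGetD (a :: as) ((n : Int) + 1) 0 = as.getD n 0 := by
          rw [hc, PySem.List.pyGetD_natCast]; simp
        simp only [Function.comp, Nat.succ_eq_add_one, Nat.cast_add, Nat.cast_one, e1, e2]
        simp [List.getD]

-- Total clamped deficit = total demand minus capped supply, since per item
-- max 0 (n*c - a) = n*c - min a (n*c); the lengths hypothesis makes zip cover all of ing.
theorem deficit_eq_demand_sub_usable (cur : Int) (ing av : List Int) (h : ing.length ≤ av.length) :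
    ((ing.zip av).map (fun p => max 0 (p.1 * cur - p.2))).sum =
      cur * ing.sum - ((ing.zip av).map (fun p => min p.2 (p.1 * cur))).sum := by
  induction ing generalizing av with
  | nil => simp
  | cons x xs ih =>
    cases av with
    | nil => simp at h
    | cons a as =>
      have := ih as (by simpa using h)
      simp only [List.zip_cons_cons, List.map_cons, List.sum_cons, List.sum_cons] at *
      rw [this]
      have : max 0 (x * cur - a) = x * cur - min a (x * cur) := by omega
      rw [this]; ring

-- ===== VERDICT (by name: the statement is the Claim_ definition above) =====
theorem can_bake_cookies_spec : Claim_equal_can_bake_cookies := by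
  intro cur ing av k _ hpre
  unfold Spec_can_bake_cookies can_bake_cookies can_bake_cookies_alt
  rw [loop_eq_sum, range_sum_eq_zip_sum cur ing av hpre,
      deficit_eq_demand_sub_usable cur ing av hpre]
  simp only [decide_eq_decide]
  omega
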